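-- pv_equiv track=rewrite | github.com/rnrlcrm/rnrltradehub-backend | services/automation_service.py | calculate_risk_score
-- ===== SOURCE A (Python) =====
-- from typing import Optional, Dict, Any
--
-- def calculate_risk_score(entity_type: str, changes: Dict[str, Any]) -> int:
--     """
--     Calculate risk score for an amendment request.
--
--     Risk Scoring:
--     - 0-20: Low risk (auto-approve)
--     - 21-50: Medium risk (requires review)
--     - 51-100: High risk (requires admin approval)
--
--     Args:
--         entity_type: Type of entity being changed
--         changes: Dictionary of changes with old/new values
--
--     Returns:
--         Risk score (0-100)
--     """
--     risk_score = 0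
--
--     # Base risk by entity type
--     entity_risk = {
--         "business_partner": 30,
--         "branch": 20,
--         "user": 25
--     }
--     risk_score += entity_risk.get(entity_type, 50)
--
--     # Risk based on fields changed
--     high_risk_fields = ["pan", "gstin", "bank_account_no", "legal_name"]
--     medium_risk_fields = ["contact_email", "contact_phone", "address"]
--     low_risk_fields = ["branch_name", "notes", "description"]
--
--     new_values = changes.get("new_values", {})
--
--     for field in new_values.keys():
--         if field in high_risk_fields:
--             risk_score += 30
--         elif field in medium_risk_fields:
--             risk_score += 10
--         elif field in low_risk_fields:
--             risk_score += 5
--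
--     # Cap at 100
--     return min(risk_score, 100)
-- ===== SOURCE B (Python) =====
-- # B inverts A's loop: instead of classifying each changed field against three
-- # category lists, it scans the fixed 10-entry weight table once, adding each
-- # entry's weight when that field appears among the changed fields.
-- FIELD_WEIGHTS = {
--     "pan": 30, "gstin": 30, "bank_account_no": 30, "legal_name": 30,
--     "contact_email": 10, "contact_phone": 10, "address": 10,
--     "branch_name": 5, "notes": 5, "description": 5,
-- }
-- ENTITY_RISK = {"business_partner": 30, "branch": 20, "user": 25}
--
--
-- def calculate_risk_score(entity_type: str, changes: dict) -> int:
--     changed = set(changes.get("new_values", {}))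
--     score = ENTITY_RISK.get(entity_type, 50)
--     for field, weight in FIELD_WEIGHTS.items():
--         if field in changed:
--             score += weight
--     return min(score, 100)
-- ===== Notes on version B (the rewrite author's own statement) =====
-- stated objective: alternative
-- what changed: Inverts the loop: instead of iterating the changed fields and classifying each with an if/elif chain over three category lists, B iterates a single constant field->weight table and adds the weight whenever that field is among the changed fields (a set); exact because the categories are disjoint and dict keys are unique.
import Mathlib
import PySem

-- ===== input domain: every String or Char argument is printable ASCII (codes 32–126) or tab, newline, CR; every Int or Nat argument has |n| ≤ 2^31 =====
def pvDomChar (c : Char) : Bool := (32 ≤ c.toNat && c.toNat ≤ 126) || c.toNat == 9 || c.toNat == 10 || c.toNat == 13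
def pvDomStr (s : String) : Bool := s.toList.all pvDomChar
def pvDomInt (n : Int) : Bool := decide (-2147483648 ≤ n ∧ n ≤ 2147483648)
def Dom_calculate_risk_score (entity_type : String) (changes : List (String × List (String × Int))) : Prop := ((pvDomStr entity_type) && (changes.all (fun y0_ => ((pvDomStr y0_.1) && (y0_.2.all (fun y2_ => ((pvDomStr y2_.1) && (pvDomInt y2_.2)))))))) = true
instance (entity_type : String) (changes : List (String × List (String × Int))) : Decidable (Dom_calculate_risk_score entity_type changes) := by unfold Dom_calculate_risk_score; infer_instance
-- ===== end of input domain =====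

-- B inverts A's loop: it scans a single constant field->weight table and adds each
-- weight whose field appears among the changed fields, instead of classifying each
-- changed field with an if/elif chain over three category lists (objective: alternative).


-- ===== PORT A =====
def calculate_risk_score (entity_type : String) (changes : List (String × List (String × Int))) : Int :=
  let risk_score : Int := 0
  let entity_risk : PySem.Dict String Int :=
    PySem.Dict.ofList [("business_partner", 30), ("branch", 20), ("user", 25)]
  let risk_score := risk_score + entity_risk.getD entity_type 50
  let high_risk_fields : List String := ["pan", "gstin", "bank_account_no", "legal_name"]
  let medium_risk_fields : List String := ["contact_email", "contact_phone", "address"]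
  let low_risk_fields : List String := ["branch_name", "notes", "description"]
  let new_values : PySem.Dict String Int :=
    PySem.Dict.ofList ((PySem.Dict.ofList changes).getD "new_values" [])
  let risk_score := new_values.keys.foldl (fun acc field =>
      if field ∈ high_risk_fields then acc + 30
      else if field ∈ medium_risk_fields then acc + 10
      else if field ∈ low_risk_fields then acc + 5
      else acc) risk_score
  min risk_score 100

-- ===== PORT B =====
def pvFIELD_WEIGHTS : List (String × Int) :=
  [("pan", 30), ("gstin", 30), ("bank_account_no", 30), ("legal_name", 30),
   ("contact_email", 10), ("contact_phone", 10), ("address", 10),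
   ("branch_name", 5), ("notes", 5), ("description", 5)]
def pvENTITY_RISK : PySem.Dict String Int :=
  PySem.Dict.ofList [("business_partner", 30), ("branch", 20), ("user", 25)]

def calculate_risk_score_alt (entity_type : String) (changes : List (String × List (String × Int))) : Int :=
  let changed : PySem.Set String :=
    PySem.Set.ofList (PySem.Dict.keys (PySem.Dict.ofList ((PySem.Dict.ofList changes).getD "new_values" [])))
  let score : Int := pvENTITY_RISK.getD entity_type 50
  let score := pvFIELD_WEIGHTS.foldl (fun acc p =>
      if PySem.Set.contains changed p.1 then acc + p.2 else acc) score
  min score 100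

-- ===== PRECONDITION & SPEC =====
def Spec_calculate_risk_score (entity_type : String) (changes : List (String × List (String × Int))) (out : Int) : Prop := out = calculate_risk_score_alt entity_type changes
instance (entity_type : String) (changes : List (String × List (String × Int))) (out : Int) : Decidable (Spec_calculate_risk_score entity_type changes out) := by unfold Spec_calculate_risk_score; infer_instance

-- ===== CLAIM (what is proved, stated in full; the proofs are below) =====
def Claim_equal_calculate_risk_score : Prop := ∀ (entity_type : String) (changes : List (String × List (String × Int))), Dom_calculate_risk_score entity_type changes → Spec_calculate_risk_score entity_type changes (calculate_risk_score entity_type changes)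

-- ===== LEMMAS AND PROOFS =====

-- the weight table's contribution of a single field f
def pvLookup (f : String) : Int :=
  pvFIELD_WEIGHTS.foldl (fun acc p => if p.1 = f then acc + p.2 else acc) 0

-- shift the accumulator out of a conditional-add fold over any table
theorem pv_shift (P : String → Prop) [DecidablePred P] (W : List (String × Int)) (s : Int) :
    W.foldl (fun acc p => if P p.1 then acc + p.2 else acc) s
      = s + W.foldl (fun acc p => if P p.1 then acc + p.2 else acc) 0 := by
  induction W generalizing s with
  | nil => simp
  | cons a W ih =>
    simp only [List.foldl_cons]
    rw [ih, ih (if P a.1 then 0 + a.2 else 0)]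
    split_ifs <;> ring

-- extending the changed-field set by a fresh field f bumps the table fold by pvLookup f
theorem pv_fresh (W : List (String × Int)) (f : String) (rest : List String)
    (hf : f ∉ rest) (s : Int) :
    W.foldl (fun acc p => if p.1 ∈ f :: rest then acc + p.2 else acc) s
      = W.foldl (fun acc p => if p.1 ∈ rest then acc + p.2 else acc) s
        + W.foldl (fun acc p => if p.1 = f then acc + p.2 else acc) 0 := by
  induction W generalizing s with
  | nil => simp
  | cons a W ih =>
    simp only [List.foldl_cons]
    rw [ih, pv_shift (fun x => x = f) W (if a.1 = f then (0:Int) + a.2 else 0),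
        pv_shift (fun x => x ∈ rest) W (if a.1 ∈ f :: rest then s + a.2 else s),
        pv_shift (fun x => x ∈ rest) W (if a.1 ∈ rest then s + a.2 else s)]
    by_cases h1 : a.1 = f
    · simp [List.mem_cons, h1, hf]; ring
    · simp [List.mem_cons, h1]

-- A's if/elif increment for one field equals that field's weight-table contribution
theorem pv_delta (f : String) :
    (if f ∈ (["pan", "gstin", "bank_account_no", "legal_name"] : List String) then (30 : Int)
     else if f ∈ (["contact_email", "contact_phone", "address"] : List String) then 10
     else if f ∈ (["branch_name", "notes", "description"] : List String) then 5
     else 0) = pvLookup f := by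
  by_cases h1 : f ∈ (["pan", "gstin", "bank_account_no", "legal_name"] : List String)
  · fin_cases h1 <;> decide
  · by_cases h2 : f ∈ (["contact_email", "contact_phone", "address"] : List String)
    · fin_cases h2 <;> decide
    · by_cases h3 : f ∈ (["branch_name", "notes", "description"] : List String)
      · fin_cases h3 <;> decide
      · simp only [List.mem_cons, List.not_mem_nil, or_false, not_or] at h1 h2 h3
        simp [h1, h2, h3, pvLookup, pvFIELD_WEIGHTS,
          Ne.symm h1.1, Ne.symm h1.2.1, Ne.symm h1.2.2.1, Ne.symm h1.2.2.2,
          Ne.symm h2.1, Ne.symm h2.2.1, Ne.symm h2.2.2,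
          Ne.symm h3.1, Ne.symm h3.2.1, Ne.symm h3.2.2]

-- A's per-field fold over a duplicate-free key list equals B's fold over the weight table
theorem pv_main (ks : List String) (h : ks.Nodup) (s : Int) :
    ks.foldl (fun acc field =>
        if field ∈ (["pan", "gstin", "bank_account_no", "legal_name"] : List String) then acc + 30
        else if field ∈ (["contact_email", "contact_phone", "address"] : List String) then acc + 10
        else if field ∈ (["branch_name", "notes", "description"] : List String) then acc + 5
        else acc) s
      = pvFIELD_WEIGHTS.foldl (fun acc p => if p.1 ∈ ks then acc + p.2 else acc) s := by
  induction ks generalizing s with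
  | nil => simp [pvFIELD_WEIGHTS]
  | cons f rest ih =>
    obtain ⟨hf, hnd⟩ := List.nodup_cons.mp h
    simp only [List.foldl_cons]
    rw [ih hnd, pv_fresh pvFIELD_WEIGHTS f rest hf s]
    have hstep : (if f ∈ (["pan", "gstin", "bank_account_no", "legal_name"] : List String) then s + 30
        else if f ∈ (["contact_email", "contact_phone", "address"] : List String) then s + 10
        else if f ∈ (["branch_name", "notes", "description"] : List String) then s + 5
        else s) = s + pvLookup f := by
      rw [← pv_delta f]; split_ifs <;> ring
    rw [hstep, pv_shift (fun x => x ∈ rest) pvFIELD_WEIGHTS (s + pvLookup f),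
      pv_shift (fun x => x ∈ rest) pvFIELD_WEIGHTS s]
    unfold pvLookup
    ring

theorem calculate_risk_score_aux (entity_type : String)
    (changes : List (String × List (String × Int))) :
    calculate_risk_score entity_type changes = calculate_risk_score_alt entity_type changes := by
  unfold calculate_risk_score calculate_risk_score_alt pvENTITY_RISK
  simp only []
  set ks := PySem.Dict.keys (PySem.Dict.ofList ((PySem.Dict.ofList changes).getD "new_values" [])) with hks
  have hnd : ks.Nodup := PySem.Dict.nodup_keys_ofList _
  rw [PySem.Set.ofList_eq_self_of_nodup _ hnd, pv_main ks hnd]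
  simp [PySem.Set.contains, List.contains_eq_mem]

-- ===== VERDICT (by name: the statement is the Claim_ definition above) =====
theorem calculate_risk_score_spec : Claim_equal_calculate_risk_score := by
  intro et ch _
  exact calculate_risk_score_aux et ch
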